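-- pv_equiv track=rewrite | github.com/sn-ravance/auditgithub | src/api/routers/contributor_profiles.py | get_canonical_email
-- ===== SOURCE A (Python) =====
-- from typing import Optional, List, Dict, Any
--
-- def get_canonical_email(emails: List[str]) -> Optional[str]:
--     """Pick the best email from a list, preferring corporate domain."""
--     if not emails:
--         return None
--     # Prefer sleepnumber.com
--     for email in emails:
--         if email and 'sleepnumber.com' in email.lower() and 'noreply' not in email.lower():
--             return email
--     # Exclude noreply emails
--     non_noreply = [e for e in emails if e and 'noreply' not in e.lower()]
--     return non_noreply[0] if non_noreply else emails[0]
-- ===== SOURCE B (Python) =====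
-- def get_canonical_email(emails):
--     """Pick the best email from a list, preferring corporate domain."""
--     if not emails:
--         return None
--     first_corporate = None
--     first_non_noreply = None
--     for email in emails:
--         low = email.lower()
--         if email and 'noreply' not in low:
--             if first_corporate is None and 'sleepnumber.com' in low:
--                 first_corporate = email
--             if first_non_noreply is None:
--                 first_non_noreply = email
--     if first_corporate is not None:
--         return first_corporate
--     if first_non_noreply is not None:
--         return first_non_noreply
--     return emails[0]
-- ===== Notes on version B (the rewrite author's own statement) =====
-- stated objective: alternative
-- what changed: Replaced A's three traversals (a corporate-email scan, a filter building the non-noreply list, plus indexing) with a single fold over the list maintaining two set-once accumulators (first corporate match, first non-noreply match) combined at the end.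
import Mathlib
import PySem

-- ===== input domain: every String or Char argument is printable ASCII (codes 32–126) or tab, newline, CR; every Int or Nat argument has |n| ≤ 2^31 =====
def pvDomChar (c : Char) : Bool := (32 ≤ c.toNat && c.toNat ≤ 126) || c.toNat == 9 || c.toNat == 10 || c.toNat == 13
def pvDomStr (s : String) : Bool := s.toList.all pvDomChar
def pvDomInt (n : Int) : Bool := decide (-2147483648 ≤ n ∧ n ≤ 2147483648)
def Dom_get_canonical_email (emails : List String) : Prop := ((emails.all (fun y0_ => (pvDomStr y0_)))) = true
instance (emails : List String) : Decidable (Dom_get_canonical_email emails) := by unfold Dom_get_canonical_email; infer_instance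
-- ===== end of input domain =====

-- B replaces A's three traversals with one fold keeping two set-once accumulators (alternative decomposition, same cost).

-- ===== PORT A =====
-- 'if email' truthiness = email ≠ ""; the first for-loop-with-return is List.find?
def get_canonical_email (emails : List String) : Option String :=
  if emails = [] then none
  else
    match emails.find? (fun email =>
        email ≠ "" && PySem.Str.isIn "sleepnumber.com" (PySem.Str.lower email)
          && !PySem.Str.isIn "noreply" (PySem.Str.lower email)) with
    | some email => some email
    | none =>
      let non_noreply := emails.filter (fun e =>
        e ≠ "" && !PySem.Str.isIn "noreply" (PySem.Str.lower e))
      match non_noreply with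
      | x :: _ => some x
      | [] => PySem.List.pyGet? emails 0

-- ===== PORT B =====
def get_canonical_email_alt_step (s : Option String × Option String) (email : String) :
    Option String × Option String :=
  if email ≠ "" && !PySem.Str.isIn "noreply" (PySem.Str.lower email) then
    (if s.1.isNone && PySem.Str.isIn "sleepnumber.com" (PySem.Str.lower email) then some email
     else s.1,
     if s.2.isNone then some email else s.2)
  else s

def get_canonical_email_alt (emails : List String) : Option String :=
  if emails = [] then none
  else
    let s := emails.foldl get_canonical_email_alt_step (none, none)
    match s.1 with
    | some e => some e
    | none =>
      match s.2 with
      | some e => some e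
      | none => PySem.List.pyGet? emails 0

-- ===== PRECONDITION & SPEC =====
def Spec_get_canonical_email (emails : List String) (out : Option String) : Prop := out = get_canonical_email_alt emails
instance (emails : List String) (out : Option String) : Decidable (Spec_get_canonical_email emails out) := by unfold Spec_get_canonical_email; infer_instance

-- ===== CLAIM (what is proved, stated in full; the proofs are below) =====
def Claim_equal_get_canonical_email : Prop := ∀ (emails : List String), Dom_get_canonical_email emails → Spec_get_canonical_email emails (get_canonical_email emails)

-- ===== LEMMAS AND PROOFS =====

def pvCorp (e : String) : Bool :=
  e ≠ "" && PySem.Str.isIn "sleepnumber.com" (PySem.Str.lower e)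
    && !PySem.Str.isIn "noreply" (PySem.Str.lower e)

def pvKeep (e : String) : Bool :=
  e ≠ "" && !PySem.Str.isIn "noreply" (PySem.Str.lower e)

-- one step of the fold updates each accumulator exactly like Option.or of a find? step
theorem pv_step_eq (a b : Option String) (x : String) :
    get_canonical_email_alt_step (a, b) x
      = (a.or (if pvCorp x then some x else none),
         b.or (if pvKeep x then some x else none)) := by
  unfold get_canonical_email_alt_step pvCorp pvKeep
  generalize decide (x ≠ "") = p
  generalize PySem.Str.isIn "sleepnumber.com" (PySem.Str.lower x) = q
  generalize PySem.Str.isIn "noreply" (PySem.Str.lower x) = r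
  cases p <;> cases q <;> cases r <;> cases a <;> cases b <;> rfl

-- the fold computes the first corporate match and the first non-noreply match
theorem pv_fold_eq (xs : List String) (a b : Option String) :
    xs.foldl get_canonical_email_alt_step (a, b)
      = (a.or (xs.find? pvCorp), b.or (xs.find? pvKeep)) := by
  induction xs generalizing a b with
  | nil => simp
  | cons x xs ih =>
    rw [List.foldl_cons, pv_step_eq, ih]
    cases hc : pvCorp x <;> cases hk : pvKeep x <;>
      simp [hc, hk]

theorem pv_head_filter {α : Type} (p : α → Bool) (xs : List α) :
    (xs.filter p).head? = xs.find? p := by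
  induction xs with
  | nil => rfl
  | cons x xs ih =>
    by_cases h : p x <;> simp [List.find?, h, ih]

-- ===== VERDICT (by name: the statement is the Claim_ definition above) =====
theorem get_canonical_email_spec : Claim_equal_get_canonical_email := by
  intro emails _
  unfold Spec_get_canonical_email get_canonical_email get_canonical_email_alt
  by_cases hne : emails = []
  · simp [hne]
  · simp only [hne, if_false]
    rw [pv_fold_eq]
    simp only [Option.or]
    show (match emails.find? pvCorp with
      | some email => some email
      | none => match emails.filter pvKeep with
        | x :: _ => some x
        | [] => PySem.List.pyGet? emails 0) = _
    cases hc : emails.find? pvCorp with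
    | some e => rfl
    | none =>
      have := pv_head_filter pvKeep emails
      cases hk : emails.find? pvKeep with
      | some e =>
        rw [hk] at this
        cases hf : emails.filter pvKeep with
        | nil => simp [hf] at this
        | cons y ys => rw [hf] at this; simp at this; simp [this]
      | none =>
        rw [hk] at this
        cases hf : emails.filter pvKeep with
        | nil => rfl
        | cons y ys => rw [hf] at this; simp at this
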